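-- pv_equiv track=rewrite | github.com/pypi-data/pypi-mirror-372 | packages/catocli/catocli-2.1.3-py3-none-any.whl/catocli/parsers/customParserApiClient.py | renderCamelCase
-- ===== SOURCE A (Python) =====
-- def renderCamelCase(path_str):
--     """
--     Convert dot-separated path to camelCase
--
--     Args:
--         path_str: Dot-separated string like 'app.stats'
--
--     Returns:
--         camelCase string like 'appStats'
--     """
--     if not path_str:
--         return ""
--
--     result = ""
--     path_ary = path_str.split(".")
--
--     for i, path in enumerate(path_ary):
--         if not path:  # Skip empty parts
--             continue
--
--         if i == 0:
--             result += path[0].lower() + path[1:] if len(path) > 1 else path.lower()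
--         else:
--             result += path[0].upper() + path[1:] if len(path) > 1 else path.upper()
--
--     return result
-- ===== SOURCE B (Python) =====
-- def renderCamelCase(path_str):
--     """Convert dot-separated path to camelCase (single char scan, no split)."""
--     if not path_str:
--         return ""
--     out = []
--     passed_dot = False
--     at_part_start = True
--     for ch in path_str:
--         if ch == '.':
--             passed_dot = True
--             at_part_start = True
--         elif at_part_start:
--             out.append(ch.upper() if passed_dot else ch.lower())
--             at_part_start = False
--         else:
--             out.append(ch)
--     return "".join(out)
-- ===== Notes on version B (the rewrite author's own statement) =====
-- stated objective: alternative
-- what changed: Replaces the split-on-dot+enumerate over parts by a single character scan carrying two flags (passed_dot, at_part_start), building the output chars in one pass with no intermediate parts list.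
import Mathlib
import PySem

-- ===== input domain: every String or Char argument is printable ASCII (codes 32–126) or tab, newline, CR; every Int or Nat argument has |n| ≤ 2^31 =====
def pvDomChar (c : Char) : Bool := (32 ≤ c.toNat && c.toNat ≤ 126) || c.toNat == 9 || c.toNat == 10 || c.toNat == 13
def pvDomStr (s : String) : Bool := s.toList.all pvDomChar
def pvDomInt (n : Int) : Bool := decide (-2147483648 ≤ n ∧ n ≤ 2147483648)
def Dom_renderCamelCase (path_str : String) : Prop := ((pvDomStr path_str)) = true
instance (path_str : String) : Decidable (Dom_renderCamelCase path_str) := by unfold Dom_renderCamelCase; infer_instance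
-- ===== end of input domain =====

-- B replaces split+enumerate by a single character scan with two flags (passed_dot / at_part_start); objective: alternative single-pass decomposition, same cost.


-- ===== PORT A =====
-- one enumerate-fold step of A's loop body (branches in A's order)
def pvStepA (result : List Char) (ip : Int × List Char) : List Char :=
  match ip with
  | (_, []) => result            -- if not path: continue
  | (i, c :: rest) =>
    if i = 0 then
      result ++ (if PySem.Chars.len (c :: rest) > 1 then PySem.Chars.lowerChar c :: rest
                 else PySem.Chars.lower (c :: rest))
    else
      result ++ (if PySem.Chars.len (c :: rest) > 1 then PySem.Chars.upperChar c :: rest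
                 else PySem.Chars.upper (c :: rest))

def renderCamelCase (path_str : String) : String :=
  if path_str.toList = [] then "" else
  let path_ary := PySem.Chars.splitOn path_str.toList ['.']
  String.mk ((PySem.List.enumerate path_ary).foldl pvStepA [])

-- ===== PORT B =====
-- scan state: (passed_dot, at_part_start, out)
def pvAltStep (st : Bool × Bool × List Char) (ch : Char) : Bool × Bool × List Char :=
  if ch = '.' then (true, true, st.2.2)
  else if st.2.1 then
    (st.1, false, st.2.2 ++ [if st.1 then PySem.Chars.upperChar ch else PySem.Chars.lowerChar ch])
  else (st.1, st.2.1, st.2.2 ++ [ch])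

def renderCamelCase_alt (path_str : String) : String :=
  if path_str.toList = [] then "" else
  String.mk (path_str.toList.foldl pvAltStep (false, true, [])).2.2

-- ===== PRECONDITION & SPEC =====
def Spec_renderCamelCase (path_str : String) (out : String) : Prop := out = renderCamelCase_alt path_str
instance (path_str : String) (out : String) : Decidable (Spec_renderCamelCase path_str out) := by unfold Spec_renderCamelCase; infer_instance

-- ===== CLAIM (what is proved, stated in full; the proofs are below) =====
def Claim_equal_renderCamelCase : Prop := ∀ (path_str : String), Dom_renderCamelCase path_str → Spec_renderCamelCase path_str (renderCamelCase path_str)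

-- ===== LEMMAS AND PROOFS =====

-- simple structural splitter on '.', equal to PySem.Chars.splitOn · ['.']
def pvF : List Char → List Char → List (List Char)
  | [], cur => [cur.reverse]
  | c :: rest, cur => if c = '.' then cur.reverse :: pvF rest [] else pvF rest (c :: cur)

def pvLow : List Char → List Char
  | [] => []
  | c :: r => PySem.Chars.lowerChar c :: r

def pvUp : List Char → List Char
  | [] => []
  | c :: r => PySem.Chars.upperChar c :: r

def pvRenderU (ps : List (List Char)) : List Char := (ps.map pvUp).flatten

def pvRenderL : List (List Char) → List Char
  | [] => []
  | p :: ps => pvLow p ++ pvRenderU ps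

-- the common character-scan semantics
def pvCamel : List Char → Bool → Bool → List Char
  | [], _, _ => []
  | c :: cs, pd, st =>
    if c = '.' then pvCamel cs true true
    else if st then (if pd then PySem.Chars.upperChar c else PySem.Chars.lowerChar c) :: pvCamel cs pd false
    else c :: pvCamel cs pd false

theorem pvGo_eq : ∀ (fuel : Nat) (l cur : List Char) (acc : List (List Char)), l.length < fuel →
    PySem.Chars.splitOn.go ['.'] fuel l cur acc = acc.reverse ++ pvF l cur := by
  intro fuel
  induction fuel with
  | zero => intro l cur acc h; omega
  | succ n ih =>
    intro l cur acc h
    cases l with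
    | nil => simp [PySem.Chars.splitOn.go, pvF]
    | cons c rest =>
      by_cases hc : c = '.'
      · subst hc
        simp only [PySem.Chars.splitOn.go, List.isPrefixOf, beq_self_eq_true, Bool.true_and,
          if_true]
        have hd : List.drop (['.'] : List Char).length ('.' :: rest) = rest := rfl
        rw [hd, ih rest [] (cur.reverse :: acc) (by simp at h ⊢; omega)]
        simp [pvF]
      · have hbc : ('.' == c) = false := by simp [Ne.symm hc]
        simp only [PySem.Chars.splitOn.go, List.isPrefixOf, hbc, Bool.false_and,
          Bool.false_eq_true, if_false]
        rw [ih rest (c :: cur) acc (by simp at h ⊢; omega)]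
        simp [pvF, hc]

theorem pvSplitOn_eq (cs : List Char) : PySem.Chars.splitOn cs ['.'] = pvF cs [] := by
  unfold PySem.Chars.splitOn
  rw [pvGo_eq (cs.length + 1) cs [] [] (by omega)]
  simp

theorem pvF_cur : ∀ (cs cur : List Char),
    pvF cs cur = (cur.reverse ++ (pvF cs []).headI) :: (pvF cs []).tail := by
  intro cs
  induction cs with
  | nil => intro cur; simp [pvF]
  | cons c rest ih =>
    intro cur
    by_cases hc : c = '.'
    · subst hc; simp [pvF]
    · simp only [pvF, hc, if_false]
      rw [ih (c :: cur), ih [c]]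
      simp

theorem pvCamel_eq_render : ∀ (cs : List Char),
    pvCamel cs false true = pvRenderL (pvF cs []) ∧
    pvCamel cs true true = pvRenderU (pvF cs []) ∧
    ∀ pd, pvCamel cs pd false = (pvF cs []).headI ++ pvRenderU (pvF cs []).tail := by
  intro cs
  induction cs with
  | nil => simp [pvCamel, pvF, pvRenderL, pvRenderU, pvLow, pvUp]
  | cons c rest ih =>
    obtain ⟨ihL, ihU, ihM⟩ := ih
    by_cases hc : c = '.'
    · subst hc
      refine ⟨?_, ?_, ?_⟩ <;>
        simp [pvCamel, pvF, pvRenderL, pvRenderU, pvLow, pvUp, ihU]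
    · have hF : pvF (c :: rest) [] = (c :: (pvF rest []).headI) :: (pvF rest []).tail := by
        simp only [pvF, hc, if_false]
        rw [pvF_cur rest [c]]; simp
      refine ⟨?_, ?_, ?_⟩
      · rw [hF]
        simp [pvCamel, hc, pvRenderL, pvLow, ihM false]
      · rw [hF]
        simp [pvCamel, hc, pvRenderU, pvUp, ihM true]
      · intro pd
        rw [hF]
        simp [pvCamel, hc, ihM pd]

theorem pvStepA_up (acc : List Char) (i : Int) (p : List Char) (hi : i ≠ 0) :
    pvStepA acc (i, p) = acc ++ pvUp p := by
  cases p with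
  | nil => simp [pvStepA, pvUp]
  | cons c rest =>
    cases rest with
    | nil => simp [pvStepA, hi, pvUp, PySem.Chars.len, PySem.Chars.upper]
    | cons d r => simp [pvStepA, hi, pvUp, PySem.Chars.len]

theorem pvFoldA_tail : ∀ (ps : List (List Char)) (s : Int) (acc : List Char), 1 ≤ s →
    (PySem.List.enumerate ps s).foldl pvStepA acc = acc ++ pvRenderU ps := by
  intro ps
  induction ps with
  | nil => intro s acc _; simp [PySem.List.enumerate, pvRenderU]
  | cons p ps ih =>
    intro s acc hs
    rw [PySem.List.enumerate_cons]
    simp only [List.foldl_cons]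
    rw [pvStepA_up acc s p (by omega), ih (s + 1) _ (by omega)]
    simp [pvRenderU]

theorem pvFoldA_eq (ps : List (List Char)) :
    (PySem.List.enumerate ps).foldl pvStepA [] = pvRenderL ps := by
  cases ps with
  | nil => simp [PySem.List.enumerate, pvRenderL]
  | cons p ps =>
    rw [PySem.List.enumerate_cons]
    simp only [List.foldl_cons]
    have hstep : pvStepA [] (0, p) = pvLow p := by
      cases p with
      | nil => simp [pvStepA, pvLow]
      | cons c rest =>
        cases rest with
        | nil => simp [pvStepA, pvLow, PySem.Chars.len, PySem.Chars.lower]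
        | cons d r => simp [pvStepA, pvLow, PySem.Chars.len]
    rw [hstep, pvFoldA_tail ps (0 + 1) (pvLow p) (by omega)]
    simp [pvRenderL]

theorem pvFoldB_eq : ∀ (cs : List Char) (pd st : Bool) (acc : List Char),
    (cs.foldl pvAltStep (pd, st, acc)).2.2 = acc ++ pvCamel cs pd st := by
  intro cs
  induction cs with
  | nil => intro pd st acc; simp [pvCamel]
  | cons c rest ih =>
    intro pd st acc
    simp only [List.foldl_cons]
    by_cases hc : c = '.'
    · subst hc
      simp only [pvAltStep, if_true, pvCamel]
      exact ih true true acc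
    · cases st with
      | true =>
        simp only [pvAltStep, hc, if_false, if_true]
        rw [ih pd false _]
        cases pd <;> simp [pvCamel, hc]
      | false =>
        simp only [pvAltStep, hc, if_false, Bool.false_eq_true]
        rw [ih pd false (acc ++ [c])]
        simp [pvCamel, hc]

-- ===== VERDICT (by name: the statement is the Claim_ definition above) =====
theorem renderCamelCase_spec : Claim_equal_renderCamelCase := by
  intro path_str _
  unfold Spec_renderCamelCase renderCamelCase renderCamelCase_alt
  by_cases h : path_str.toList = []
  · simp [h]
  · simp only [h, if_false]
    rw [pvSplitOn_eq, pvFoldA_eq, pvFoldB_eq]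
    rw [(pvCamel_eq_render path_str.toList).1]
    simp
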